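-- pv_equiv track=rewrite | github.com/daniel-reich/turbo-robot | 76ibd8jZxvhAwDskb_13.py | tallest_skyscraper
-- ===== SOURCE A (Python) =====
-- def tallest_skyscraper(lst):
--   output = []
--   tallest = 0
--   for i in range(len(lst)):
--     for j in lst[i]:
--       if j != 0:
--         output.append([i,j])
--   low = len(lst)
--   for i,j in output:
--     if i < low:
--       low = i
--   return len(lst)-low
-- ===== SOURCE B (Python) =====
-- def tallest_skyscraper(lst):
--   for i, row in enumerate(lst):
--     if any(v != 0 for v in row):
--       return len(lst) - i
--   return 0
-- ===== Notes on version B (the rewrite author's own statement) =====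
-- stated objective: simpler
-- what changed: Single early-exiting top-down scan returning len(lst)-i at the first row containing a nonzero value, replacing A's construction of an intermediate [index,value] pair list followed by a separate minimum-index scan.
import Mathlib
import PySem

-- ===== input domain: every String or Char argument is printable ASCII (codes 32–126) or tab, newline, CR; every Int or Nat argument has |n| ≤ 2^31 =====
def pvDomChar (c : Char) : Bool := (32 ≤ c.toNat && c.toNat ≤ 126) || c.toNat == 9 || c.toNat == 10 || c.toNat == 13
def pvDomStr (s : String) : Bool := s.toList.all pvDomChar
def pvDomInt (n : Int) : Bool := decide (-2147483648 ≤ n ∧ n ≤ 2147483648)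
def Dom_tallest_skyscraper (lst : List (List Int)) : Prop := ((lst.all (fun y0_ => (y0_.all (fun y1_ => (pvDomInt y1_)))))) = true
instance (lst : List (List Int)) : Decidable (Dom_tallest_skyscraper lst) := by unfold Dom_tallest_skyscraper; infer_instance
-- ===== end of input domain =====

-- B replaces A's intermediate [index,value] pair list and separate minimum-index scan
-- with a single early-exiting top-down scan (objective: simpler). Return values only; no mutation in either.

-- ===== PORT A =====
def tallest_skyscraper (lst : List (List Int)) : Int :=
  let output : List (Int × Int) :=
    (List.range lst.length).foldl
      (fun acc i =>
        (lst.getD i []).foldl (fun acc2 j => if j ≠ 0 then acc2 ++ [((i : Int), j)] else acc2) acc)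
      []
  let low : Int :=
    output.foldl (fun low pr => if pr.1 < low then pr.1 else low) (lst.length : Int)
  (lst.length : Int) - low

-- ===== PORT B =====
def tsAltGo (n : Int) (i : Int) : List (List Int) → Int
  | [] => 0
  | r :: rs => if r.any (fun v => decide (v ≠ 0)) then n - i else tsAltGo n (i + 1) rs

def tallest_skyscraper_alt (lst : List (List Int)) : Int :=
  tsAltGo (lst.length : Int) 0 lst

-- ===== PRECONDITION & SPEC =====
def Spec_tallest_skyscraper (lst : List (List Int)) (out : Int) : Prop := out = tallest_skyscraper_alt lst
instance (lst : List (List Int)) (out : Int) : Decidable (Spec_tallest_skyscraper lst out) := by unfold Spec_tallest_skyscraper; infer_instance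

-- ===== CLAIM (what is proved, stated in full; the proofs are below) =====
def Claim_equal_tallest_skyscraper : Prop := ∀ (lst : List (List Int)), Dom_tallest_skyscraper lst → Spec_tallest_skyscraper lst (tallest_skyscraper lst)

-- ===== LEMMAS AND PROOFS =====

/-- The pairs A's double loop appends, for rows `rest` sitting at indices `k, k+1, …`. -/
def tsPairs : Nat → List (List Int) → List (Int × Int)
  | _, [] => []
  | k, r :: rs => (r.filter (fun j => decide (j ≠ 0))).map (fun j => ((k : Int), j)) ++ tsPairs (k + 1) rs

/-- A's min-scan step. -/
def tsStep (low : Int) (pr : Int × Int) : Int := if pr.1 < low then pr.1 else low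

-- inner loop = append of filtered/mapped pairs
theorem ts_inner_eq (i : Nat) : ∀ (r : List Int) (acc : List (Int × Int)),
    r.foldl (fun acc2 j => if j ≠ 0 then acc2 ++ [((i : Int), j)] else acc2) acc
      = acc ++ (r.filter (fun j => decide (j ≠ 0))).map (fun j => ((i : Int), j)) := by
  intro r
  induction r with
  | nil => simp
  | cons a r ih =>
      intro acc
      simp only [List.foldl_cons, List.filter_cons]
      by_cases h : a ≠ 0
      · rw [if_pos h, if_pos (by simp [h]), ih]
        simp
      · rw [if_neg h, if_neg (by simp [h]), ih]

-- outer loop produces exactly tsPairs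
theorem ts_output_eq : ∀ (rest pre : List (List Int)) (acc : List (Int × Int)),
    (List.range' pre.length rest.length).foldl
      (fun acc i => ((pre ++ rest).getD i []).foldl
        (fun acc2 j => if j ≠ 0 then acc2 ++ [((i : Int), j)] else acc2) acc) acc
      = acc ++ tsPairs pre.length rest := by
  intro rest
  induction rest with
  | nil => intro pre acc; simp [tsPairs]
  | cons r rs ih =>
      intro pre acc
      simp only [List.length_cons]
      rw [List.range'_succ]
      simp only [List.foldl_cons]
      have hget : (pre ++ r :: rs).getD pre.length [] = r := by
        simp [List.getD]
      rw [hget, ts_inner_eq]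
      have hlen : pre.length + 1 = (pre ++ [r]).length := by simp
      have happ : (pre ++ [r]) ++ rs = pre ++ r :: rs := by simp
      calc (List.range' (pre.length + 1) rs.length).foldl
            (fun acc i => ((pre ++ r :: rs).getD i []).foldl
              (fun acc2 j => if j ≠ 0 then acc2 ++ [((i : Int), j)] else acc2) acc)
            (acc ++ (r.filter (fun j => decide (j ≠ 0))).map (fun j => ((pre.length : Int), j)))
          = (acc ++ (r.filter (fun j => decide (j ≠ 0))).map (fun j => ((pre.length : Int), j)))
              ++ tsPairs (pre ++ [r]).length rs := by
            rw [hlen, ← happ]; exact ih (pre ++ [r]) _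
      _ = acc ++ tsPairs pre.length (r :: rs) := by
            simp [tsPairs]

-- the min-scan ignores pairs whose index is ≥ the running minimum
theorem ts_fold_const (k : Nat) (c : Int) (hc : c ≤ (k : Int)) :
    ∀ (js : List Int), (js.map (fun j => ((k : Int), j))).foldl tsStep c = c := by
  intro js
  induction js with
  | nil => rfl
  | cons a js ih =>
      have : tsStep c ((k : Int), a) = c := by
        simp only [tsStep]; rw [if_neg (by omega)]
      simp only [List.map_cons, List.foldl_cons, this, ih]

theorem ts_fold_stay : ∀ (rest : List (List Int)) (k : Nat) (c : Int), c ≤ (k : Int) →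
    (tsPairs k rest).foldl tsStep c = c := by
  intro rest
  induction rest with
  | nil => intro k c _; rfl
  | cons r rs ih =>
      intro k c hc
      simp only [tsPairs, List.foldl_append]
      rw [ts_fold_const k c hc]
      exact ih (k + 1) c (by push_cast; omega)

-- one nonempty row's pairs drop the minimum to min c k
theorem ts_fold_row (k : Nat) (c : Int) :
    ∀ (js : List Int), js ≠ [] → (js.map (fun j => ((k : Int), j))).foldl tsStep c = min c (k : Int) := by
  intro js hjs
  match js with
  | [] => exact absurd rfl hjs
  | a :: js =>
      simp only [List.map_cons, List.foldl_cons]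
      have h1 : tsStep c ((k : Int), a) = min c (k : Int) := by
        simp only [tsStep]; split <;> omega
      rw [h1, ts_fold_const k _ (by omega)]

/-- Characterisation of A's min-scan over the produced pairs. -/
theorem ts_minfold : ∀ (rest : List (List Int)) (k : Nat) (m : Int), (k : Int) ≤ m →
    (tsPairs k rest).foldl tsStep m
      = match rest.findIdx? (fun r => r.any (fun v => decide (v ≠ 0))) with
        | some i => min m ((k : Int) + (i : Int))
        | none => m := by
  intro rest
  induction rest with
  | nil => intro k m _; rfl
  | cons r rs ih =>
      intro k m hkm
      simp only [tsPairs, List.foldl_append]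
      rw [List.findIdx?_cons]
      by_cases h : r.any (fun v => decide (v ≠ 0)) = true
      · have hr : r.filter (fun j => decide (j ≠ 0)) ≠ [] := by
          rw [List.any_eq_true] at h
          rcases h with ⟨x, hx, hpx⟩
          intro hnil
          have := List.filter_eq_nil_iff.mp hnil x hx
          simp_all
        rw [ts_fold_row k m _ hr, ts_fold_stay rs (k + 1) _ (by push_cast; omega), if_pos h]
        simp
      · have hfalse : r.any (fun v => decide (v ≠ 0)) = false := by
          cases hb : r.any (fun v => decide (v ≠ 0)) with
          | true => exact absurd hb h
          | false => rfl
        have hr : r.filter (fun j => decide (j ≠ 0)) = [] := by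
          rw [List.filter_eq_nil_iff]
          intro x hx
          rw [List.any_eq_false] at hfalse
          exact hfalse x hx
        rw [hr, if_neg h]
        simp only [List.map_nil, List.foldl_nil]
        by_cases hk1 : ((k : Int) + 1) ≤ m
        · rw [ih (k + 1) m (by push_cast; omega)]
          cases hfi : rs.findIdx? (fun r => r.any (fun v => decide (v ≠ 0))) with
          | none => simp
          | some i => simp only [Option.map_some]; push_cast; ring_nf
        · rw [ts_fold_stay rs (k + 1) m (by push_cast; omega)]
          cases hfi : rs.findIdx? (fun r => r.any (fun v => decide (v ≠ 0))) with
          | none => simp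
          | some i =>
              simp only [Option.map_some]
              rw [min_eq_left (by push_cast; omega)]

theorem ts_findIdx?_lt {α : Type} (p : α → Bool) : ∀ (l : List α) (i : Nat),
    l.findIdx? p = some i → i < l.length := by
  intro l
  induction l with
  | nil => intro i h; rw [List.findIdx?_nil] at h; exact absurd h (by simp)
  | cons a l ih =>
      intro i h
      rw [List.findIdx?_cons] at h
      by_cases hp : p a
      · rw [if_pos hp] at h
        have : i = 0 := by simpa using h.symm
        simp [this]
      · rw [if_neg hp, Option.map_eq_some_iff] at h
        rcases h with ⟨j, hj, rfl⟩
        have := ih j hj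
        simp only [List.length_cons]
        omega

/-- B's scan in terms of findIdx?. -/
theorem ts_altGo_eq (n : Int) : ∀ (rest : List (List Int)) (i : Int),
    tsAltGo n i rest
      = match rest.findIdx? (fun r => r.any (fun v => decide (v ≠ 0))) with
        | some j => n - (i + (j : Int))
        | none => 0 := by
  intro rest
  induction rest with
  | nil => intro i; rfl
  | cons r rs ih =>
      intro i
      simp only [tsAltGo]
      rw [List.findIdx?_cons]
      by_cases h : r.any (fun v => decide (v ≠ 0)) = true
      · rw [if_pos (by exact h), if_pos h]
        simp
      · rw [if_neg (by exact h), if_neg h, ih (i + 1)]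
        cases hfi : rs.findIdx? (fun r => r.any (fun v => decide (v ≠ 0))) with
        | none => simp
        | some j => simp only [Option.map_some]; push_cast; ring_nf

-- ===== VERDICT (by name: the statement is the Claim_ definition above) =====
theorem tallest_skyscraper_spec : Claim_equal_tallest_skyscraper := by
  intro lst _
  unfold Spec_tallest_skyscraper
  simp only [tallest_skyscraper, tallest_skyscraper_alt]
  rw [List.range_eq_range']
  have houtput := ts_output_eq lst ([] : List (List Int)) []
  simp only [List.nil_append, List.length_nil] at houtput
  rw [houtput]
  rw [show (fun (low : Int) (pr : Int × Int) => if pr.1 < low then pr.1 else low) = tsStep from rfl]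
  rw [ts_minfold lst 0 (lst.length : Int) (by positivity), ts_altGo_eq]
  cases hfi : lst.findIdx? (fun r => r.any (fun v => decide (v ≠ 0))) with
  | none => simp
  | some i =>
      have hi := ts_findIdx?_lt _ lst i hfi
      simp only [Nat.cast_zero, zero_add]
      rw [min_eq_right (by exact_mod_cast Nat.le_of_lt hi)]
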